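-- pv_equiv track=rewrite | github.com/kobolibra/short-term-pre-market-analysis | scripts/duanxianxia_fetcher.py | _normalize_ztpool_html
-- ===== SOURCE A (Python) =====
-- from typing import Any, Dict, List, Tuple
--
-- def _normalize_ztpool_html(html: Any) -> str:
--     text = str(html or '')
--     replacements = {
--         '<@>': "<div class='jjgn'>",
--         "<#'": "<span class='kline' code='",
--         '<Aa>': "<span class='change'>",
--     }
--     for old, new in replacements.items():
--         text = text.replace(old, new)
--     return text
-- ===== SOURCE B (Python) =====
-- _TOKENS = (
--     ('<@>', "<div class='jjgn'>"),
--     ("<#'", "<span class='kline' code='"),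
--     ('<Aa>', "<span class='change'>"),
-- )
--
-- def _normalize_ztpool_html(html):
--     text = str(html or '')
--     out = []
--     i = 0
--     n = len(text)
--     while i < n:
--         for old, new in _TOKENS:
--             if text.startswith(old, i):
--                 out.append(new)
--                 i += len(old)
--                 break
--         else:
--             out.append(text[i])
--             i += 1
--     return ''.join(out)
-- ===== Notes on version B (the rewrite author's own statement) =====
-- stated objective: alternative
-- what changed: A runs three sequential str.replace passes over the whole string; B builds the result in one left-to-right scan that tries each token at the current position and appends its replacement (or the character), joining the pieces once at the end.
import Mathlib
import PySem

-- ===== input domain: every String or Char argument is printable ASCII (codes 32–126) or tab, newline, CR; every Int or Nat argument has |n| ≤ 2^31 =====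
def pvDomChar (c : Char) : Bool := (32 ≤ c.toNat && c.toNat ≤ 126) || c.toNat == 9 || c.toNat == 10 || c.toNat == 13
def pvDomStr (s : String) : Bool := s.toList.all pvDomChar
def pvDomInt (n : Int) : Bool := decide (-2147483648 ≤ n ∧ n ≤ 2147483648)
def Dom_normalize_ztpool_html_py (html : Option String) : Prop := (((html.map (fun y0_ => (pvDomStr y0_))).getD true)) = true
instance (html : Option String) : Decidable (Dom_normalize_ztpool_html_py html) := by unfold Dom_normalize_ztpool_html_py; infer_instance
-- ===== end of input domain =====

-- B replaces A's three sequential full-string .replace passes with one left-to-right scan that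
-- matches each token at the current position and advances past it (objective: alternative single-pass algorithm).

-- ===== PORT A =====
-- str(html or '') : None and "" are both falsy, so the coercion is html.getD ""
def normalize_ztpool_html_py (html : Option String) : String :=
  let text := html.getD ""
  let text := PySem.Str.replace text "<@>" "<div class='jjgn'>"
  let text := PySem.Str.replace text "<#'" "<span class='kline' code='"
  PySem.Str.replace text "<Aa>" "<span class='change'>"

-- ===== PORT B =====
-- Source B's while-loop: at index i try text.startswith(old, i) for each token in order,
-- emit its replacement and advance by len(old), otherwise copy one character.
def pvScan : List Char → List Char
  | [] => []
  | c :: t =>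
    if (['<', '@', '>'] : List Char).isPrefixOf (c :: t) then
      "<div class='jjgn'>".toList ++ pvScan (t.drop 2)
    else if (['<', '#', '\''] : List Char).isPrefixOf (c :: t) then
      "<span class='kline' code='".toList ++ pvScan (t.drop 2)
    else if (['<', 'A', 'a', '>'] : List Char).isPrefixOf (c :: t) then
      "<span class='change'>".toList ++ pvScan (t.drop 3)
    else
      c :: pvScan t
termination_by l => l.length
decreasing_by
  all_goals (simp [List.length_drop]; try omega)

def normalize_ztpool_html_py_alt (html : Option String) : String :=
  String.ofList (pvScan (html.getD "").toList)

-- ===== PRECONDITION & SPEC =====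
def Spec_normalize_ztpool_html_py (html : Option String) (out : String) : Prop := out = normalize_ztpool_html_py_alt html
instance (html : Option String) (out : String) : Decidable (Spec_normalize_ztpool_html_py html out) := by unfold Spec_normalize_ztpool_html_py; infer_instance

-- ===== CLAIM (what is proved, stated in full; the proofs are below) =====
def Claim_equal_normalize_ztpool_html_py : Prop := ∀ (html : Option String), Dom_normalize_ztpool_html_py html → Spec_normalize_ztpool_html_py html (normalize_ztpool_html_py html)

-- ===== LEMMAS AND PROOFS =====

-- go with any sufficient fuel equals the canonical call, with the accumulator flushed in front
theorem pvGoAcc (old new : List Char) (hold : old ≠ []) :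
    ∀ fuel l acc, l.length ≤ fuel →
      PySem.Chars.replace.go old new fuel l acc
        = acc.reverse ++ PySem.Chars.replace.go old new l.length l [] := by
  intro fuel
  induction fuel using Nat.strong_induction_on with
  | _ fuel ih =>
    match fuel with
    | 0 =>
      intro l acc h
      have hl : l = [] := by cases l <;> simp_all
      subst hl
      simp [PySem.Chars.replace.go]
    | (n+1) =>
      intro l acc h
      cases l with
      | nil => simp [PySem.Chars.replace.go]
      | cons c t =>
        have ht : t.length ≤ n := by simpa using h
        have ho : 1 ≤ old.length := by cases old with
          | nil => exact absurd rfl hold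
          | cons o os => simp
        rw [PySem.Chars.replace.go]
        by_cases hp : old.isPrefixOf (c :: t) = true
        · simp only [hp, if_pos]
          have hd' : (List.drop old.length (c :: t)).length ≤ t.length := by
            simp only [List.length_drop, List.length_cons]
            omega
          have hd : (List.drop old.length (c :: t)).length ≤ n := le_trans hd' ht
          rw [ih n (by omega) _ _ hd]
          conv_rhs =>
            rw [show (c :: t).length = t.length + 1 from rfl, PySem.Chars.replace.go]
          simp only [hp, if_pos]
          rw [ih t.length (by omega) _ _ hd']
          simp
        · rw [if_neg hp]
          rw [ih n (by omega) t (c :: acc) ht]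
          conv_rhs =>
            rw [show (c :: t).length = t.length + 1 from rfl, PySem.Chars.replace.go]
          rw [if_neg hp]
          rw [ih t.length (by omega) t [c] le_rfl]
          simp
-- rewrite rules characterising replace as a left-to-right scanner
theorem pvRepEqGo (old new l : List Char) (hold : old ≠ []) :
    PySem.Chars.replace l old new = PySem.Chars.replace.go old new l.length l [] := by
  rw [PySem.Chars.replace, if_neg (by simp [hold])]

theorem pvRepNil (old new : List Char) (hold : old ≠ []) :
    PySem.Chars.replace [] old new = [] := by
  rw [pvRepEqGo old new [] hold]
  simp [PySem.Chars.replace.go]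

theorem pvRepPos (old new l : List Char) (hold : old ≠ []) (hp : old.isPrefixOf l = true) :
    PySem.Chars.replace l old new = new ++ PySem.Chars.replace (l.drop old.length) old new := by
  cases l with
  | nil =>
    cases old with
    | nil => exact absurd rfl hold
    | cons o os => simp [List.isPrefixOf] at hp
  | cons c t =>
    have ho : 1 ≤ old.length := by cases old with
      | nil => exact absurd rfl hold
      | cons o os => simp
    rw [pvRepEqGo old new _ hold, pvRepEqGo old new _ hold]
    rw [show (c :: t).length = t.length + 1 from rfl, PySem.Chars.replace.go]
    simp only [hp, if_pos]
    have hd' : (List.drop old.length (c :: t)).length ≤ t.length := by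
      simp only [List.length_drop, List.length_cons]; omega
    rw [pvGoAcc old new hold t.length _ _ hd']
    simp

theorem pvRepNeg (old new : List Char) (c : Char) (t : List Char)
    (hp : old.isPrefixOf (c :: t) = false) :
    PySem.Chars.replace (c :: t) old new = c :: PySem.Chars.replace t old new := by
  have hold : old ≠ [] := by
    intro h; subst h; simp [List.isPrefixOf] at hp
  rw [pvRepEqGo old new _ hold, pvRepEqGo old new _ hold]
  rw [show (c :: t).length = t.length + 1 from rfl, PySem.Chars.replace.go]
  rw [if_neg (by simp [hp])]
  rw [pvGoAcc old new hold t.length t [c] le_rfl]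
  simp

-- a pattern containing no '<' can only prefix the output of replace (whose emitted text
-- starts with '<') if it already prefixes the input
theorem pvTrace (old : List Char) (new' : List Char) (hold : old ≠ []) :
    ∀ (pat : List Char) (v : List Char), (∀ x ∈ pat, x ≠ '<') →
      pat.isPrefixOf (PySem.Chars.replace v old ('<' :: new')) = true →
      pat.isPrefixOf v = true := by
  intro pat
  induction pat with
  | nil => intro v _ _; simp [List.isPrefixOf]
  | cons q pat' ih =>
    intro v hq hpre
    cases v with
    | nil =>
      rw [pvRepNil old _ hold] at hpre
      simp [List.isPrefixOf] at hpre
    | cons c w =>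
      by_cases hp : old.isPrefixOf (c :: w) = true
      · rw [pvRepPos old _ _ hold hp] at hpre
        simp [List.isPrefixOf] at hpre
        exact absurd hpre.1 (hq q (by simp))
      · rw [pvRepNeg old _ c w ((Bool.not_eq_true _) ▸ hp)] at hpre
        simp only [List.isPrefixOf, Bool.and_eq_true, beq_iff_eq] at hpre ⊢
        exact ⟨hpre.1, ih w (fun x hx => hq x (List.mem_cons_of_mem _ hx)) hpre.2⟩


-- stepping each later replace over emitted/untouched literal text it cannot match in
theorem pvSkip21 (new y : List Char) :
    PySem.Chars.replace ("<div class='jjgn'>".toList ++ y) ['<', '#', '\''] new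
      = "<div class='jjgn'>".toList ++ PySem.Chars.replace y ['<', '#', '\''] new := by
  simp [pvRepNeg, List.isPrefixOf, List.cons_append]

theorem pvSkip31 (new y : List Char) :
    PySem.Chars.replace ("<div class='jjgn'>".toList ++ y) ['<', 'A', 'a', '>'] new
      = "<div class='jjgn'>".toList ++ PySem.Chars.replace y ['<', 'A', 'a', '>'] new := by
  simp [pvRepNeg, List.isPrefixOf, List.cons_append]

theorem pvSkip32 (new y : List Char) :
    PySem.Chars.replace ("<span class='kline' code='".toList ++ y) ['<', 'A', 'a', '>'] new
      = "<span class='kline' code='".toList ++ PySem.Chars.replace y ['<', 'A', 'a', '>'] new := by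
  simp [pvRepNeg, List.isPrefixOf, List.cons_append]

theorem pvSkip1T2 (new y : List Char) :
    PySem.Chars.replace (['<', '#', '\''] ++ y) ['<', '@', '>'] new
      = ['<', '#', '\''] ++ PySem.Chars.replace y ['<', '@', '>'] new := by
  simp [pvRepNeg, List.isPrefixOf, List.cons_append]

theorem pvSkip1T3 (new y : List Char) :
    PySem.Chars.replace (['<', 'A', 'a', '>'] ++ y) ['<', '@', '>'] new
      = ['<', 'A', 'a', '>'] ++ PySem.Chars.replace y ['<', '@', '>'] new := by
  simp [pvRepNeg, List.isPrefixOf, List.cons_append]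

theorem pvSkip2T3 (new y : List Char) :
    PySem.Chars.replace (['<', 'A', 'a', '>'] ++ y) ['<', '#', '\''] new
      = ['<', 'A', 'a', '>'] ++ PySem.Chars.replace y ['<', '#', '\''] new := by
  simp [pvRepNeg, List.isPrefixOf, List.cons_append]

theorem pvR1split : "<div class='jjgn'>".toList = '<' :: "div class='jjgn'>".toList := by decide
theorem pvR2split : "<span class='kline' code='".toList = '<' :: "span class='kline' code='".toList := by decide

-- the three sequential replaces equal the single scan
set_option maxRecDepth 8192 in
theorem pvMain (l : List Char) :
    PySem.Chars.replace
      (PySem.Chars.replace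
        (PySem.Chars.replace l ['<', '@', '>'] "<div class='jjgn'>".toList)
        ['<', '#', '\''] "<span class='kline' code='".toList)
      ['<', 'A', 'a', '>'] "<span class='change'>".toList
      = pvScan l := by
  induction hll : l.length using Nat.strong_induction_on generalizing l with
  | _ n ih =>
    cases l with
    | nil =>
      simp [pvRepNil, pvScan]
    | cons c t =>
      subst hll
      by_cases h1 : (['<', '@', '>'] : List Char).isPrefixOf (c :: t) = true
      · obtain ⟨u, hu⟩ := List.isPrefixOf_iff_prefix.mp h1
        have hc : c = '<' ∧ t = '@' :: '>' :: u := by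
          simpa using hu.symm
        obtain ⟨rfl, rfl⟩ := hc
        rw [pvRepPos _ _ _ (by simp) h1]
        simp only [List.length_cons, List.length_nil, List.drop_succ_cons, List.drop_zero]
        rw [pvSkip21, pvSkip31]
        rw [pvScan]
        simp only [h1, if_pos, List.drop_succ_cons, List.drop_zero]
        rw [ih u.length (by simp only [List.length_cons]; omega) u rfl]
      · by_cases h2 : (['<', '#', '\''] : List Char).isPrefixOf (c :: t) = true
        · obtain ⟨u, hu⟩ := List.isPrefixOf_iff_prefix.mp h2
          have hc : c = '<' ∧ t = '#' :: '\'' :: u := by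
            simpa using hu.symm
          obtain ⟨rfl, rfl⟩ := hc
          rw [show ('<' :: '#' :: '\'' :: u) = ['<', '#', '\''] ++ u from rfl, pvSkip1T2]
          rw [pvRepPos _ _ _ (by simp) (List.isPrefixOf_iff_prefix.mpr ⟨_, rfl⟩)]
          simp only [List.length_cons, List.length_nil]
          rw [pvSkip32]
          rw [pvScan.eq_def]
          simp [h1, h2]
          exact ih u.length (by simp only [List.length_cons]; omega) u rfl
        · by_cases h3 : (['<', 'A', 'a', '>'] : List Char).isPrefixOf (c :: t) = true
          · obtain ⟨u, hu⟩ := List.isPrefixOf_iff_prefix.mp h3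
            have hc : c = '<' ∧ t = 'A' :: 'a' :: '>' :: u := by
              simpa using hu.symm
            obtain ⟨rfl, rfl⟩ := hc
            rw [show ('<' :: 'A' :: 'a' :: '>' :: u) = ['<', 'A', 'a', '>'] ++ u from rfl,
              pvSkip1T3, pvSkip2T3]
            rw [pvRepPos _ _ _ (by simp) (List.isPrefixOf_iff_prefix.mpr ⟨_, rfl⟩)]
            simp only [List.length_cons, List.length_nil]
            rw [pvScan.eq_def]
            simp [h1, h2, h3]
            exact ih u.length (by simp only [List.length_cons]; omega) u rfl
          · rw [pvRepNeg _ _ c t ((Bool.not_eq_true _) ▸ h1)]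
            have hT2 : (['<', '#', '\''] : List Char).isPrefixOf
                (c :: PySem.Chars.replace t ['<', '@', '>'] "<div class='jjgn'>".toList) = false := by
              rcases Bool.eq_false_or_eq_true ((['<', '#', '\''] : List Char).isPrefixOf
                (c :: PySem.Chars.replace t ['<', '@', '>'] "<div class='jjgn'>".toList)) with hx | hx
              case inr => exact hx
              case inl =>
                exfalso
                simp only [List.isPrefixOf_cons₂, Bool.and_eq_true, beq_iff_eq] at hx
                have htr := pvTrace ['<', '@', '>'] "div class='jjgn'>".toList (by simp)
                  ['#', '\''] t (by simp) (by rw [← pvR1split]; exact hx.2)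
                apply h2
                simp only [List.isPrefixOf_cons₂, Bool.and_eq_true, beq_iff_eq]
                exact ⟨hx.1, htr⟩
            rw [pvRepNeg _ _ _ _ hT2]
            have hT3 : (['<', 'A', 'a', '>'] : List Char).isPrefixOf
                (c :: PySem.Chars.replace
                  (PySem.Chars.replace t ['<', '@', '>'] "<div class='jjgn'>".toList)
                  ['<', '#', '\''] "<span class='kline' code='".toList) = false := by
              rcases Bool.eq_false_or_eq_true ((['<', 'A', 'a', '>'] : List Char).isPrefixOf
                (c :: PySem.Chars.replace
                  (PySem.Chars.replace t ['<', '@', '>'] "<div class='jjgn'>".toList)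
                  ['<', '#', '\''] "<span class='kline' code='".toList)) with hx | hx
              case inr => exact hx
              case inl =>
                exfalso
                simp only [List.isPrefixOf_cons₂, Bool.and_eq_true, beq_iff_eq] at hx
                have htr2 := pvTrace ['<', '#', '\''] "span class='kline' code='".toList (by simp)
                  ['A', 'a', '>'] _ (by simp) (by rw [← pvR2split]; exact hx.2)
                have htr1 := pvTrace ['<', '@', '>'] "div class='jjgn'>".toList (by simp)
                  ['A', 'a', '>'] t (by simp) (by rw [← pvR1split]; exact htr2)
                apply h3
                simp only [List.isPrefixOf_cons₂, Bool.and_eq_true, beq_iff_eq]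
                exact ⟨hx.1, htr1⟩
            rw [pvRepNeg _ _ _ _ hT3]
            rw [pvScan.eq_def]
            simp [h1, h2, h3]
            exact ih t.length (by simp only [List.length_cons]; omega) t rfl

-- ===== VERDICT (by name: the statement is the Claim_ definition above) =====
theorem pvT1lit : "<@>".toList = ['<', '@', '>'] := by decide
theorem pvT2lit : "<#'".toList = ['<', '#', '\''] := by decide
theorem pvT3lit : "<Aa>".toList = ['<', 'A', 'a', '>'] := by decide

theorem normalize_ztpool_html_py_spec : Claim_equal_normalize_ztpool_html_py := by
  intro html _
  unfold Spec_normalize_ztpool_html_py normalize_ztpool_html_py normalize_ztpool_html_py_alt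
  simp only [PySem.Str.replace, String.toList_ofList]
  rw [pvT1lit, pvT2lit, pvT3lit]
  exact congrArg String.ofList (pvMain (html.getD "").toList)
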